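-- pv_equiv track=rewrite | github.com/kb0rg/practice_misc | cw/cw_7_completePattern2.py | pattern
-- ===== SOURCE A (Python) =====
-- def pattern(n):
--     """
--     write a function pattern which creates the following pattern up to n number
--     of rows. If the Argument is 0 or a Negative Integer then it should return
--     empty string.
--
--     for pattern(3) return
--     321
--     32
--     3
--
--     """
--
--     if n < 1:
--         return ""
--     elif n ==1:
--         return "1"
--     else:
--         pattern_string = ""
--         this_line_string = ""
--         for num in range(1, n):
--             # print range(n, num-1, -1)
--             this_line_string = "".join(str(x) for x in range(n, num-1, -1))
--             # print this_line_string
--             pattern_string = pattern_string + this_line_string + "\n"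
--         return pattern_string + str(n)
-- ===== SOURCE B (Python) =====
-- def pattern(n):
--     if n < 1:
--         return ""
--     tokens = [str(x) for x in range(n, 0, -1)]
--     return "\n".join("".join(tokens[:L]) for L in range(n, 0, -1))
-- ===== Notes on version B (the rewrite author's own statement) =====
-- stated objective: simpler
-- what changed: B drops A's special-casing and per-line range re-generation: it builds the descending token list once and emits each line as a joined prefix of it, assembling everything with a single newline-join instead of A's accumulator concatenation.
import Mathlib
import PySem

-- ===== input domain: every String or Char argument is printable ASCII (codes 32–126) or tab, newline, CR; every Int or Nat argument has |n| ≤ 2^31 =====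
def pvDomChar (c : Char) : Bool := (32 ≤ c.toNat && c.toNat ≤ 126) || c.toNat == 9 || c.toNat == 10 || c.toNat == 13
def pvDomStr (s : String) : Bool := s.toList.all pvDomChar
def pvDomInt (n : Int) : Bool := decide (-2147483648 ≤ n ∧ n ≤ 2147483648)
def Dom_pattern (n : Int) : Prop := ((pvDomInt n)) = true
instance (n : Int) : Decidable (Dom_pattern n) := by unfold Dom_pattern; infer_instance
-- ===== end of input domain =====

-- B replaces A's n==1 special case and per-line range re-generation by one precomputed
-- descending token list whose joined prefixes are the lines, assembled with a single "\n".join (objective: simpler).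

-- ===== PORT A =====
def pattern (n : Int) : String :=
  if n < 1 then ""
  else if n = 1 then "1"
  else
    let pattern_string :=
      (PySem.List.pyRange 1 n 1).foldl
        (fun pattern_string num =>
          let this_line_string :=
            PySem.Str.join "" ((PySem.List.pyRange n (num - 1) (-1)).map PySem.Int.toStr)
          pattern_string ++ this_line_string ++ "\n") ""
    pattern_string ++ PySem.Int.toStr n

-- ===== PORT B =====
def pattern_alt (n : Int) : String :=
  if n < 1 then ""
  else
    let tokens := (PySem.List.pyRange n 0 (-1)).map PySem.Int.toStr
    PySem.Str.join "\n"
      ((PySem.List.pyRange n 0 (-1)).map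
        (fun L => PySem.Str.join "" (PySem.List.slice tokens none (some L))))

-- ===== PRECONDITION & SPEC =====
def Spec_pattern (n : Int) (out : String) : Prop := out = pattern_alt n
instance (n : Int) (out : String) : Decidable (Spec_pattern n out) := by unfold Spec_pattern; infer_instance

-- ===== CLAIM (what is proved, stated in full; the proofs are below) =====
def Claim_equal_pattern : Prop := ∀ (n : Int), Dom_pattern n → Spec_pattern n (pattern n)

-- ===== LEMMAS AND PROOFS =====

-- characters of a row with m tokens: str(n) ++ str(n-1) ++ … (m tokens)
def lineL (n : Int) (m : ℕ) : List Char :=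
  List.intercalate [] ((List.range m).map (fun i : ℕ => PySem.Int.toChars (n - i)))

theorem intercalate_cons_ne {α : Type} (sep y : List α) (l : List (List α)) (h : l ≠ []) :
    List.intercalate sep (y :: l) = y ++ sep ++ List.intercalate sep l := by
  cases l with
  | nil => exact absurd rfl h
  | cons b bs => simp [List.intercalate, List.intersperse, List.append_assoc]

-- A's "append each line plus newline, then the last line" equals one "\n"-intercalate
theorem key_fold_intercalate {β : Type} (h : β → List Char) (l : List β) (last : List Char) :
    ∀ acc : List Char,
      l.foldl (fun a k => a ++ h k ++ ['\n']) acc ++ last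
        = acc ++ List.intercalate ['\n'] (l.map h ++ [last]) := by
  induction l with
  | nil => intro acc; simp [List.intercalate]
  | cons y ys ih =>
      intro acc
      rw [List.map_cons, List.cons_append, List.foldl_cons, ih,
        intercalate_cons_ne _ _ _ (by simp)]
      simp [List.append_assoc]

-- push .toList through A's string-accumulating fold
theorem foldl_toList (F : Int → String) (l : List Int) :
    ∀ acc : String,
      (l.foldl (fun a num => a ++ F num ++ "\n") acc).toList
        = l.foldl (fun a num => a ++ (F num).toList ++ ['\n']) acc.toList := by
  induction l with
  | nil => intro acc; simp
  | cons x xs ih =>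
      intro acc
      rw [List.foldl_cons, ih, List.foldl_cons]
      simp [show ("\n" : String).toList = ['\n'] by decide]

-- ===== VERDICT (by name: the statement is the Claim_ definition above) =====
theorem pattern_spec : Claim_equal_pattern := by
  intro n _
  unfold Spec_pattern
  by_cases h1 : n < 1
  · simp [pattern, pattern_alt, h1]
  · rw [not_lt] at h1
    by_cases h2 : n = 1
    · subst h2; decide
    · have hmain : (pattern n).toList = (pattern_alt n).toList := by
        unfold pattern pattern_alt
        rw [if_neg (not_lt.mpr h1), if_neg h2, if_neg (not_lt.mpr h1)]
        rw [String.toList_append,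
          foldl_toList (fun num => PySem.Str.join "" ((PySem.List.pyRange n (num - 1) (-1)).map PySem.Int.toStr))]
        simp only [PySem.Str.toList_join, PySem.List.pyRange_one, PySem.List.pyRange_neg_one,
          List.map_map, List.foldl_map, Function.comp_def, PySem.Int.toList_toStr, sub_zero,
          PySem.Chars.join, add_sub_cancel_left,
          show ("" : String).toList = [] by decide, show ("\n" : String).toList = ['\n'] by decide]
        have hrhs : (List.map
              (fun x : ℕ =>
                [].intercalate
                  (List.map String.toList
                    (PySem.List.slice (List.map (fun x : ℕ => PySem.Int.toStr (n - ↑x)) (List.range n.toNat)) none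
                      (some (n - ↑x)))))
              (List.range n.toNat))
            = (List.range n.toNat).map (fun x : ℕ => lineL n ((n - ↑x).toNat)) := by
          apply List.map_congr_left
          intro x hx
          rw [List.mem_range] at hx
          rw [PySem.List.slice_to _ (by omega), ← List.map_take, List.take_range,
            List.map_map, show min (n - ↑x).toNat n.toNat = (n - ↑x).toNat by omega, lineL]
          simp [Function.comp_def]
        rw [hrhs]
        have hsplit : List.range n.toNat = List.range (n.toNat - 1) ++ [n.toNat - 1] := by
          conv_lhs => rw [show n.toNat = (n.toNat - 1) + 1 by omega, List.range_succ]
        rw [hsplit, List.map_append, List.map_singleton,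
          show (n - ↑(n.toNat - 1)).toNat = 1 by omega,
          show lineL n 1 = PySem.Int.toChars n by simp [lineL, List.intercalate],
          show (n - 1).toNat = n.toNat - 1 by omega]
        have hk := key_fold_intercalate (fun y : ℕ => lineL n ((n - ↑y).toNat))
          (List.range (n.toNat - 1)) (PySem.Int.toChars n) []
        rw [List.nil_append] at hk
        exact hk
      calc pattern n = String.ofList (pattern n).toList := by simp
        _ = String.ofList (pattern_alt n).toList := by rw [hmain]
        _ = pattern_alt n := by simp
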